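-- pv_equiv track=rewrite | github.com/wangsun39/leetcode | allcode/1101-1200/1154dayOfYear.py | longestDecomposition1
-- ===== SOURCE A (Python) =====
-- from functools import cache
--
-- def longestDecomposition1(text: str) -> int:
--
--     @cache
--     def dfs(i, j):  # 计算 text[i: j + 1] 子问题
--         if i > j: return 0
--         if i == j:
--             return 1
--         m = j - i + 1
--         k = 1
--         res = 1
--         while k <= m // 2:
--             if text[i: i + k] == text[j - k + 1 : j + 1]:
--                 res = max(res, dfs(i + k, j - k) + 2)
--             k += 1
--         return res
--     return dfs(0, len(text) - 1)
-- ===== SOURCE B (Python) =====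
-- def longestDecomposition1(text: str) -> int:
--     # 1-D bottom-up DP over symmetric cut positions i (middle = text[i:n-i]),
--     # instead of memoized 2-D interval recursion.
--     n = len(text)
--     half = n // 2
--     g = [0] * (half + 1)          # g[i] = answer for the middle text[i:n-i]
--     g[half] = n % 2               # empty (n even) or single-char (n odd) middle
--     for i in range(half - 1, -1, -1):
--         res = 1
--         for k in range(1, (n - 2 * i) // 2 + 1):
--             if text[i:i+k] == text[n-i-k:n-i]:
--                 res = max(res, g[i+k] + 2)
--         g[i] = res
--     return g[0]
-- ===== Notes on version B (the rewrite author's own statement) =====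
-- stated objective: simpler
-- what changed: A's memoized 2-D interval recursion dfs(i,j) only ever visits symmetric intervals i+j = n-1, so B replaces it with a bottom-up 1-D array DP g[i] over cut positions (middle text[i:n-i]) computed in a plain loop from the middle outward, with no recursion or cache.
import Mathlib
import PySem

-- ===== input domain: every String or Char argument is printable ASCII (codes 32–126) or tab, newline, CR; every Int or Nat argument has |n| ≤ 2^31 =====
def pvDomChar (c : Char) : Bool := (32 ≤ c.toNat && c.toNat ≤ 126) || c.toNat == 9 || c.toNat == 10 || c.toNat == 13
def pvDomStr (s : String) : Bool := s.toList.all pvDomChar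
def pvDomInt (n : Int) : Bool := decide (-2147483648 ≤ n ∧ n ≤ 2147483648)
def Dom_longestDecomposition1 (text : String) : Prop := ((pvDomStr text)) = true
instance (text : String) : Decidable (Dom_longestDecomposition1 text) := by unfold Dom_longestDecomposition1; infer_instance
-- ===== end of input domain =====

-- B replaces A's memoized 2-D interval recursion by a bottom-up 1-D array DP over
-- symmetric cut positions; same return value everywhere (objective: simpler).

-- ===== PORT A =====
-- A's memoized dfs(i, j); the @cache only speeds Python up, it does not change the value.
-- The inner `while k <= m//2` loop is ported with k = (c : Int) + 1 (c counts completed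
-- iterations) so that k ≥ 1 is visible to the termination checker.
mutual
  def pvDfsA (t : List Char) (i j : Int) : Int :=
    if i > j then 0
    else if i = j then 1
    else pvLoopA t i j 0 1
  termination_by ((j - i + 1).toNat, (PySem.Int.floordiv (j - i + 1) 2).toNat + 2)
  decreasing_by
    exact Prod.Lex.right _ (by omega)

  def pvLoopA (t : List Char) (i j : Int) (c : Nat) (res : Int) : Int :=
    if h : (c : Int) + 1 ≤ PySem.Int.floordiv (j - i + 1) 2 then
      pvLoopA t i j (c + 1)
        (if PySem.List.slice t (some i) (some (i + ((c : Int) + 1)))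
            = PySem.List.slice t (some (j - ((c : Int) + 1) + 1)) (some (j + 1))
         then max res (pvDfsA t (i + ((c : Int) + 1)) (j - ((c : Int) + 1)) + 2) else res)
    else res
  termination_by ((j - i + 1).toNat, (PySem.Int.floordiv (j - i + 1) 2).toNat + 1 - c)
  decreasing_by
    · have h2 : (2 : Int) ≤ j - i + 1 := by
        have := (PySem.Int.le_floordiv_iff_mul_le (a := j - i + 1) (b := 2) (q := 1)
          (by omega)).mp (by omega)
        omega
      exact Prod.Lex.left _ _ (by omega)
    · exact Prod.Lex.right _ (by omega)
end

def longestDecomposition1 (text : String) : Int :=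
  pvDfsA text.toList 0 ((text.toList.length : Int) - 1)

-- ===== PORT B =====
-- the inner `for k in range(1, (n-2i)//2 + 1)` loop of Source B
def pvInnerB (t : List Char) (n i : Int) (g : List Int) : Int :=
  (PySem.List.pyRange 1 (PySem.Int.floordiv (n - 2 * i) 2 + 1) 1).foldl
    (fun res k =>
      if PySem.List.slice t (some i) (some (i + k))
        = PySem.List.slice t (some (n - i - k)) (some (n - i))
      then max res (PySem.List.pyGetD g (i + k) 0 + 2) else res) 1

-- all g-indices are in range (proved below), so pyGetD/pySetD defaults are never used
def longestDecomposition1_alt (text : String) : Int :=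
  let t := text.toList
  let n : Int := t.length
  let half := PySem.Int.floordiv n 2
  let g1 := PySem.List.pySetD (List.replicate (half + 1).toNat 0) half (PySem.Int.mod n 2)
  let g := (PySem.List.pyRange (half - 1) (-1) (-1)).foldl
    (fun g i => PySem.List.pySetD g i (pvInnerB t n i g)) g1
  PySem.List.pyGetD g 0 0

-- ===== PRECONDITION & SPEC =====
def Spec_longestDecomposition1 (text : String) (out : Int) : Prop := out = longestDecomposition1_alt text
instance (text : String) (out : Int) : Decidable (Spec_longestDecomposition1 text out) := by unfold Spec_longestDecomposition1; infer_instance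

-- ===== CLAIM (what is proved, stated in full; the proofs are below) =====
def Claim_equal_longestDecomposition1 : Prop := ∀ (text : String), Dom_longestDecomposition1 text → Spec_longestDecomposition1 text (longestDecomposition1 text)

-- ===== LEMMAS AND PROOFS =====

-- the DP base cell: the middle text[half : n - half] is empty or one character
lemma pv_baseA (t : List Char) (n : Int) (hn : n = t.length) :
    pvDfsA t (PySem.Int.floordiv n 2) (n - 1 - PySem.Int.floordiv n 2) = PySem.Int.mod n 2 := by
  have h0 : 0 ≤ n := by subst hn; positivity
  by_cases hz : n = 0
  · subst hz
    rw [pvDfsA]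
    norm_num [PySem.Int.floordiv, PySem.Int.mod]
  · rw [PySem.Int.floordiv_eq_ediv_of_pos (by omega), PySem.Int.mod_eq_emod_of_pos (by omega)]
    rw [pvDfsA]
    split_ifs with h1 h2
    · omega
    · omega
    · exfalso; omega

-- B's inner foldl computes A's while loop, given g agrees with dfs strictly above i
lemma pv_inner (t : List Char) (n : Int) (hn : n = t.length)
    (i : Int) (_hi0 : 0 ≤ i) (hi : i < PySem.Int.floordiv n 2) (g : List Int)
    (hg : ∀ p : Int, i < p → p ≤ PySem.Int.floordiv n 2 →
      PySem.List.pyGetD g p 0 = pvDfsA t p (n - 1 - p)) :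
    ∀ c : Nat, ∀ res : Int,
      (PySem.List.pyRange ((c : Int) + 1) (PySem.Int.floordiv (n - 2 * i) 2 + 1) 1).foldl
        (fun res k =>
          if PySem.List.slice t (some i) (some (i + k))
            = PySem.List.slice t (some (n - i - k)) (some (n - i))
          then max res (PySem.List.pyGetD g (i + k) 0 + 2) else res) res
      = pvLoopA t i (n - 1 - i) c res := by
  have h0 : 0 ≤ n := by subst hn; positivity
  have hhalf : PySem.Int.floordiv n 2 = n / 2 := PySem.Int.floordiv_eq_ediv_of_pos (by omega)
  have hm : (0 : Int) < n - 2 * i := by omega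
  have hfd : PySem.Int.floordiv (n - 2 * i) 2 = (n - 2 * i) / 2 :=
    PySem.Int.floordiv_eq_ediv_of_pos (by omega)
  have hJ : (n - 1 - i) - i + 1 = n - 2 * i := by ring
  have key : ∀ d : Nat, ∀ c : Nat, ∀ res : Int,
      ((n - 2 * i) / 2 - (c : Int)).toNat ≤ d →
      (PySem.List.pyRange ((c : Int) + 1) (PySem.Int.floordiv (n - 2 * i) 2 + 1) 1).foldl
        (fun res k =>
          if PySem.List.slice t (some i) (some (i + k))
            = PySem.List.slice t (some (n - i - k)) (some (n - i))
          then max res (PySem.List.pyGetD g (i + k) 0 + 2) else res) res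
      = pvLoopA t i (n - 1 - i) c res := by
    intro d
    induction d with
    | zero =>
      intro c res hd
      rw [PySem.List.pyRange_one_eq_nil (by omega)]
      rw [pvLoopA, hJ, dif_neg (by omega)]
      rfl
    | succ d ih =>
      intro c res hd
      by_cases hcond : (c : Int) + 1 ≤ PySem.Int.floordiv (n - 2 * i) 2
      · rw [PySem.List.pyRange_one_cons (by omega)]
        rw [List.foldl_cons]
        rw [pvLoopA, hJ, dif_pos hcond]
        have hA1 : (n - 1 - i) - ((c : Int) + 1) + 1 = n - i - ((c : Int) + 1) := by ring
        have hA2 : (n - 1 - i) + 1 = n - i := by ring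
        have hA3 : (n - 1 - i) - ((c : Int) + 1) = n - 1 - (i + ((c : Int) + 1)) := by ring
        rw [hA1, hA2, hA3]
        rw [hg (i + ((c : Int) + 1)) (by omega) (by omega)]
        have hcast : ((c : Int) + 1) + 1 = (((c + 1 : Nat) : Int)) + 1 := by push_cast; ring
        rw [hcast]
        exact ih (c + 1) _ (by omega)
      · rw [PySem.List.pyRange_one_eq_nil (by omega)]
        rw [pvLoopA, hJ, dif_neg (by omega)]
        rfl
  intro c res
  exact key ((n - 2 * i) / 2 - (c : Int)).toNat c res le_rfl

lemma pv_dfs_inner (t : List Char) (n : Int) (hn : n = t.length)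
    (i : Int) (hi0 : 0 ≤ i) (hi : i < PySem.Int.floordiv n 2) (g : List Int)
    (hg : ∀ p : Int, i < p → p ≤ PySem.Int.floordiv n 2 →
      PySem.List.pyGetD g p 0 = pvDfsA t p (n - 1 - p)) :
    pvInnerB t n i g = pvDfsA t i (n - 1 - i) := by
  have h0 : 0 ≤ n := by subst hn; positivity
  have hhalf : PySem.Int.floordiv n 2 = n / 2 := PySem.Int.floordiv_eq_ediv_of_pos (by omega)
  rw [pvDfsA]
  rw [if_neg (by omega), if_neg (by omega)]
  have := pv_inner t n hn i hi0 hi g hg 0 1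
  unfold pvInnerB
  simpa using this

lemma pv_outer (t : List Char) (n : Int) (hn : n = t.length) :
    ∀ (d : Nat) (i : Int), (i + 1).toNat ≤ d → -1 ≤ i → i ≤ PySem.Int.floordiv n 2 - 1 →
      ∀ g : List Int,
      g.length = (PySem.Int.floordiv n 2 + 1).toNat →
      (∀ p : Int, i < p → p ≤ PySem.Int.floordiv n 2 →
        PySem.List.pyGetD g p 0 = pvDfsA t p (n - 1 - p)) →
      ∀ p : Int, 0 ≤ p → p ≤ PySem.Int.floordiv n 2 →
        PySem.List.pyGetD ((PySem.List.pyRange i (-1) (-1)).foldl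
          (fun g i => PySem.List.pySetD g i (pvInnerB t n i g)) g) p 0
        = pvDfsA t p (n - 1 - p) := by
  have h0 : 0 ≤ n := by subst hn; positivity
  have hhalf : PySem.Int.floordiv n 2 = n / 2 := PySem.Int.floordiv_eq_ediv_of_pos (by omega)
  intro d
  induction d with
  | zero =>
    intro i hd h1 h2 g hlen hg p hp0 hp
    rw [PySem.List.pyRange_neg_one_eq_nil (by omega)]
    exact hg p (by omega) hp
  | succ d ih =>
    intro i hd h1 h2 g hlen hg p hp0 hp
    by_cases hneg : i ≤ -1
    · rw [PySem.List.pyRange_neg_one_eq_nil (by omega)]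
      exact hg p (by omega) hp
    · rw [PySem.List.pyRange_neg_one_cons (by omega)]
      rw [List.foldl_cons]
      have hv : pvInnerB t n i g = pvDfsA t i (n - 1 - i) :=
        pv_dfs_inner t n hn i (by omega) (by omega) g hg
      rw [PySem.List.pySetD_of_nonneg _ _ (by omega)]
      apply ih (i - 1) (by omega) (by omega) (by omega)
      · rw [List.length_set]; exact hlen
      · intro q hq1 hq2
        have hqlen : q.toNat < (g.set i.toNat (pvInnerB t n i g)).length := by
          rw [List.length_set, hlen]; omega
        rw [PySem.List.pyGetD_eq_getElem _ _ (by omega)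
          (by rw [List.length_set, hlen]; omega)]
        rw [List.getElem_set]
        by_cases hqi : q = i
        · rw [if_pos (by omega), hv, hqi]
        · rw [if_neg (by omega)]
          rw [← PySem.List.pyGetD_eq_getElem _ _ (by omega)
            (by rw [hlen]; omega)]
          exact hg q (by omega) hq2
      · exact hp0
      · exact hp

-- ===== VERDICT (by name: the statement is the Claim_ definition above) =====
theorem longestDecomposition1_spec : Claim_equal_longestDecomposition1 := by
  intro text _
  simp only [Spec_longestDecomposition1, longestDecomposition1, longestDecomposition1_alt]
  generalize text.toList = t
  have hn : ((t.length : Int)) = (t.length : Int) := rfl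
  have h0 : (0 : Int) ≤ (t.length : Int) := by positivity
  have hhalf : PySem.Int.floordiv (t.length : Int) 2 = (t.length : Int) / 2 :=
    PySem.Int.floordiv_eq_ediv_of_pos (by omega)
  have hlen1 : (PySem.List.pySetD (List.replicate (PySem.Int.floordiv (t.length : Int) 2 + 1).toNat 0)
      (PySem.Int.floordiv (t.length : Int) 2) (PySem.Int.mod (t.length : Int) 2)).length
      = (PySem.Int.floordiv (t.length : Int) 2 + 1).toNat := by
    rw [PySem.List.pySetD_of_nonneg _ _ (by omega), List.length_set, List.length_replicate]
  have hgbase : ∀ p : Int, PySem.Int.floordiv (t.length : Int) 2 - 1 < p →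
      p ≤ PySem.Int.floordiv (t.length : Int) 2 →
      PySem.List.pyGetD (PySem.List.pySetD (List.replicate (PySem.Int.floordiv (t.length : Int) 2 + 1).toNat 0)
        (PySem.Int.floordiv (t.length : Int) 2) (PySem.Int.mod (t.length : Int) 2)) p 0
      = pvDfsA t p ((t.length : Int) - 1 - p) := by
    intro p hp1 hp2
    have hph : p = PySem.Int.floordiv (t.length : Int) 2 := by omega
    subst hph
    rw [PySem.List.pySetD_of_nonneg _ _ (by omega)]
    rw [PySem.List.pyGetD_eq_getElem _ _ (by omega)
      (by rw [List.length_set, List.length_replicate]; omega)]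
    rw [List.getElem_set, if_pos rfl]
    exact (pv_baseA t (t.length : Int) rfl).symm
  have := pv_outer t (t.length : Int) rfl
    (PySem.Int.floordiv (t.length : Int) 2 - 1 + 1).toNat
    (PySem.Int.floordiv (t.length : Int) 2 - 1) le_rfl (by omega) (by omega)
    _ hlen1 hgbase 0 le_rfl (by omega)
  have h' : (t.length : Int) - 1 - 0 = (t.length : Int) - 1 := by ring
  rw [h'] at this
  exact this.symm
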